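-- pv_equiv track=rewrite | github.com/psemchyshyn/Flights-analysis | modules/dash_app/retrieve_data_v_2.py | filter_flights
-- ===== SOURCE A (Python) =====
-- def filter_flights(data_response, filter_type="depart_date"):
--     if filter_type == "return_date":
--         new_data = {v["return_date"]: v for v in sorted(data_response, \
--             key=lambda flight: flight["return_date"])}
--     elif filter_type == "depart_date":
--         new_data = {v["depart_date"]: v for v in sorted(data_response, \
--             key=lambda flight: flight["depart_date"])}
--     elif filter_type == "found_at":
--         new_data = {v["found_at"]: v for v in sorted(data_response, \
--             key=lambda flight: flight["found_at"])}
--     return new_data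
-- ===== SOURCE B (Python) =====
-- def filter_flights(data_response, filter_type="depart_date"):
--     if filter_type in ("return_date", "depart_date", "found_at"):
--         seen = set()
--         pairs = []
--         for v in reversed(data_response):  # last original occurrence per key wins
--             key = v[filter_type]
--             if key not in seen:
--                 seen.add(key)
--                 pairs.append((key, v))
--         pairs.sort(key=lambda kv: kv[0])
--         new_data = dict(pairs)
--     return new_data
-- ===== Notes on version B (the rewrite author's own statement) =====
-- stated objective: alternative
-- what changed: B replaces A's sort-all-rows-then-build-dict with a single reverse scan that dedupes via a seen-set (keeping the last original occurrence per key), then sorts only the deduped (key,row) pairs and rebuilds the dict from them.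
import Mathlib
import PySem

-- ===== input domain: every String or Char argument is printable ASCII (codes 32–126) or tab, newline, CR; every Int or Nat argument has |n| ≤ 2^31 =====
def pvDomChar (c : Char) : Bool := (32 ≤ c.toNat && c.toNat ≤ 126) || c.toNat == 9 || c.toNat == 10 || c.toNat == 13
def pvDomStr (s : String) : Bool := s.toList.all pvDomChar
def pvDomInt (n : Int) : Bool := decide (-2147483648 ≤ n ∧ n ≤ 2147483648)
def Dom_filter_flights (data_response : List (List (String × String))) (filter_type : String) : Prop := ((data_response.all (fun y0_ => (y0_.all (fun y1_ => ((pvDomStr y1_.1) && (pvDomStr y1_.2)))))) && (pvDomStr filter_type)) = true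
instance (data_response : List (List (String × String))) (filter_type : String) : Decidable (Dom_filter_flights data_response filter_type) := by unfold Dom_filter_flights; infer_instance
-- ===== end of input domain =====

-- B dedupes in one reverse scan with a seen-set (last original occurrence per key wins), then
-- sorts only the deduped (key, row) pairs and rebuilds the dict; proved equal to A on Pre_
-- (return values only).

-- v[field]: first-match lookup in the row; a missing key is a Python KeyError, excluded by Pre_
-- (the .getD "" default is never reached inside Pre_).
def pvLookup (v : List (String × String)) (field : String) : String :=
  ((PySem.Dict.mk v).get? field).getD ""

-- ===== PORT A =====
-- {v[field]: v for v in sorted(data_response, key=lambda flight: flight[field])}, returned as its items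
def pvBuildA (data : List (List (String × String))) (field : String) :
    List (String × List (String × String)) :=
  ((PySem.List.sorted data (fun v => pvLookup v field) false).foldl
      (fun d v => d.insert (pvLookup v field) v) PySem.Dict.empty).items

def filter_flights (data_response : List (List (String × String))) (filter_type : String) :
    List (String × List (String × String)) :=
  if filter_type = "return_date" then pvBuildA data_response "return_date"
  else if filter_type = "depart_date" then pvBuildA data_response "depart_date"
  else if filter_type = "found_at" then pvBuildA data_response "found_at"
  else []  -- Python: UnboundLocalError (no branch assigns new_data); excluded by Pre_

-- ===== PORT B =====
-- for v in reversed(data_response): key = v[filter_type]; if key not in seen: seen.add(key); pairs.append((key, v))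
def pvDedupRev (data : List (List (String × String))) (field : String) :
    PySem.Set String × List (String × List (String × String)) :=
  data.reverse.foldl
    (fun st v =>
      if PySem.Set.contains st.1 (pvLookup v field) then st
      else (PySem.Set.add st.1 (pvLookup v field), st.2 ++ [(pvLookup v field, v)]))
    (PySem.Set.empty, [])

-- pairs.sort(key=lambda kv: kv[0]); new_data = dict(pairs)
def filter_flights_alt (data_response : List (List (String × String))) (filter_type : String) :
    List (String × List (String × String)) :=
  if filter_type = "return_date" ∨ filter_type = "depart_date" ∨ filter_type = "found_at" then
    ((PySem.List.sorted (pvDedupRev data_response filter_type).2 (fun kv => kv.1) false).foldl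
        (fun d kv => d.insert kv.1 kv.2) PySem.Dict.empty).items
  else []  -- Python: UnboundLocalError, same as A; excluded by Pre_

-- ===== PRECONDITION & SPEC =====
-- Pre_ excludes exactly the inputs where Python A raises: an unknown filter_type
-- (UnboundLocalError) or a row lacking the filter_type key (KeyError).
def Pre_filter_flights (data_response : List (List (String × String))) (filter_type : String) : Prop :=
  (filter_type = "return_date" ∨ filter_type = "depart_date" ∨ filter_type = "found_at") ∧
  ∀ row ∈ data_response, (PySem.Dict.mk row).contains filter_type = true
instance (data_response : List (List (String × String))) (filter_type : String) : Decidable (Pre_filter_flights data_response filter_type) := by unfold Pre_filter_flights; infer_instance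

def pvWitness_filter_flights : (List (List (String × String))) × String :=
  ([[("depart_date", "2020-01-01")], [("depart_date", "2020-01-02")]], "depart_date")

def Spec_filter_flights (data_response : List (List (String × String))) (filter_type : String) (out : List (String × List (String × String))) : Prop := out = filter_flights_alt data_response filter_type
instance (data_response : List (List (String × String))) (filter_type : String) (out : List (String × List (String × String))) : Decidable (Spec_filter_flights data_response filter_type out) := by unfold Spec_filter_flights; infer_instance

-- ===== CLAIM (what is proved, stated in full; the proofs are below) =====
def Claim_equal_filter_flights : Prop := ∀ (data_response : List (List (String × String))) (filter_type : String), Dom_filter_flights data_response filter_type → Pre_filter_flights data_response filter_type → Spec_filter_flights data_response filter_type (filter_flights data_response filter_type)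

-- ===== LEMMAS AND PROOFS =====

-- last-wins lookup of an insert-fold: the last matching element of l wins, else the old dict
theorem pv_get?_foldl {α : Type} (k : α → String) (l : List α) :
    ∀ (d : PySem.Dict String α) (x : String),
      (l.foldl (fun d v => d.insert (k v) v) d).get? x
        = (l.reverse.find? (fun v => k v == x)).or (d.get? x) := by
  induction l with
  | nil => intro d x; simp
  | cons a t ih =>
    intro d x
    simp only [List.foldl_cons, List.reverse_cons, List.find?_append, ih]
    rw [PySem.Dict.get?_insert]
    rcases h : t.reverse.find? (fun v => k v == x) with _ | v
    · by_cases hx : x = k a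
      · simp [hx, List.find?]
      · have hba : (k a == x) = false := beq_eq_false_iff_ne.mpr (fun h => hx h.symm)
        simp [hx, List.find?, hba]
    · simp

theorem pv_getLast?_cons {α : Type} (a : α) (l : List α) :
    (a :: l).getLast? = l.getLast?.or (some a) := by
  cases l with
  | nil => simp
  | cons b bs =>
    rw [List.getLast?_cons_cons]
    rcases h : (b :: bs).getLast? with _ | c
    · exact absurd (List.getLast?_eq_none_iff.mp h) (by simp)
    · simp

theorem pv_find?_reverse {α : Type} (p : α → Bool) :
    ∀ l : List α, l.reverse.find? p = (l.filter p).getLast? := by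
  intro l
  induction l with
  | nil => simp
  | cons a t ih =>
    rw [List.reverse_cons, List.find?_append, ih, List.filter_cons]
    cases hp : p a <;> simp [hp, List.find?, pv_getLast?_cons]

theorem pv_filter_insertBy_neg {α : Type} (p : α → Bool) (before : α → α → Bool) (v : α)
    (hv : p v = false) : ∀ ys : List α,
    (PySem.List.insertBy before v ys).filter p = ys.filter p := by
  intro ys
  induction ys with
  | nil => simp [PySem.List.insertBy, hv]
  | cons y ys ih =>
    simp only [PySem.List.insertBy]
    split
    · simp [List.filter_cons, hv]
    · rw [List.filter_cons, List.filter_cons, ih]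

theorem pv_filter_insertBy_pos {α : Type} (p : α → Bool) (before : α → α → Bool) (v : α)
    (hv : p v = true) : ∀ ys : List α,
    (∀ y t', (y :: t') <:+ ys → before v y = true → ∀ z ∈ y :: t', p z = false) →
    (PySem.List.insertBy before v ys).filter p = ys.filter p ++ [v] := by
  intro ys
  induction ys with
  | nil => intro _; simp [PySem.List.insertBy, hv]
  | cons y ys ih =>
    intro H
    simp only [PySem.List.insertBy]
    split
    · rename_i hb
      have hnil : (y :: ys).filter p = [] :=
        List.filter_eq_nil_iff.mpr (fun z hz => by simp [H y ys List.suffix_rfl hb z hz])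
      rw [List.filter_cons, hnil]
      simp [hv]
    · have H' : ∀ y' t', (y' :: t') <:+ ys → before v y' = true → ∀ z ∈ y' :: t', p z = false :=
        fun y' t' hs => H y' t' (hs.trans (List.suffix_cons y ys))
      rw [List.filter_cons, List.filter_cons, ih H']
      cases hp : p y <;> simp

-- stability: filtering a stable sort at one key value gives the original filtered list
theorem pv_filter_sorted {α : Type} (k : α → String) (x : String) (l : List α) :
    (PySem.List.sorted l k false).filter (fun w => k w == x) = l.filter (fun w => k w == x) := by
  induction l using List.reverseRecOn with
  | nil => simp [PySem.List.sorted]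
  | append_singleton l v ih =>
    have hstep : PySem.List.sorted (l ++ [v]) k false
        = PySem.List.insertBy (fun a b => decide (k a < k b)) v (PySem.List.sorted l k false) := by
      rw [PySem.List.sorted_eq_foldl_insertBy, PySem.List.sorted_eq_foldl_insertBy,
        List.foldl_append, List.foldl_cons, List.foldl_nil]
    rw [hstep, List.filter_append]
    by_cases hv : k v = x
    · have H : ∀ y t', (y :: t') <:+ PySem.List.sorted l k false →
          decide (k v < k y) = true → ∀ z ∈ y :: t', (k z == x) = false := by
        intro y t' hsuf hb z hz
        have hlt : k v < k y := of_decide_eq_true hb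
        have hpw : (y :: t').Pairwise (fun a b => k a ≤ k b) :=
          List.Pairwise.sublist hsuf.sublist (PySem.List.sorted_pairwise l k)
        have hyz : k y ≤ k z := by
          rcases hz with _ | hz'
          · exact le_refl _
          · exact (List.pairwise_cons.mp hpw).1 z (by assumption)
        have : k v < k z := lt_of_lt_of_le hlt hyz
        exact beq_eq_false_iff_ne.mpr (fun he => absurd (he.trans hv.symm) (ne_of_gt this))
      rw [pv_filter_insertBy_pos _ _ v (by simp [hv]) _ H, ih]
      simp [hv]
    · rw [pv_filter_insertBy_neg _ _ v (by simp [hv]), ih]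
      simp [hv]

-- proof-side recursion mirroring B's reverse-scan dedupe loop
def pvFirsts (field : String) : List (List (String × String)) → PySem.Set String →
    List (String × List (String × String))
  | [], _ => []
  | v :: t, s =>
    if PySem.Set.contains s (pvLookup v field) then pvFirsts field t s
    else (pvLookup v field, v) :: pvFirsts field t (PySem.Set.add s (pvLookup v field))

-- the fold in pvDedupRev computes pvFirsts
theorem pv_fold_snd (field : String) : ∀ (l : List (List (String × String)))
    (s : PySem.Set String) (acc : List (String × List (String × String))),
    (l.foldl
      (fun st v =>
        if PySem.Set.contains st.1 (pvLookup v field) then st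
        else (PySem.Set.add st.1 (pvLookup v field), st.2 ++ [(pvLookup v field, v)]))
      (s, acc)).2 = acc ++ pvFirsts field l s := by
  intro l
  induction l with
  | nil => intro s acc; simp [pvFirsts]
  | cons v t ih =>
    intro s acc
    simp only [List.foldl_cons, pvFirsts]
    by_cases hc : PySem.Set.contains s (pvLookup v field) = true
    · rw [if_pos hc, if_pos hc]; exact ih s acc
    · rw [if_neg hc, if_neg hc, ih]; simp

-- membership in pvFirsts: first occurrence in l of a key not already seen
theorem pv_mem_firsts (field : String) : ∀ (l : List (List (String × String)))
    (s : PySem.Set String) (x : String) (w : List (String × String)),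
    (x, w) ∈ pvFirsts field l s ↔
      x ∉ s ∧ l.find? (fun v => pvLookup v field == x) = some w := by
  intro l
  induction l with
  | nil => intro s x w; simp [pvFirsts]
  | cons v t ih =>
    intro s x w
    simp only [pvFirsts]
    by_cases hm : pvLookup v field ∈ s
    · rw [if_pos ((PySem.Set.contains_iff s (pvLookup v field)).mpr hm), ih]
      by_cases hx : pvLookup v field = x
      · constructor
        · rintro ⟨hns, _⟩; exact absurd (hx ▸ hm) hns
        · rintro ⟨hns, _⟩; exact absurd (hx ▸ hm) hns
      · have : (pvLookup v field == x) = false := beq_eq_false_iff_ne.mpr hx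
        simp [List.find?, this]
    · rw [if_neg (fun hc => hm ((PySem.Set.contains_iff s (pvLookup v field)).mp hc))]
      by_cases hx : pvLookup v field = x
      · subst hx
        simp only [List.mem_cons, ih, List.find?, BEq.rfl]
        constructor
        · rintro (he | ⟨hna, _⟩)
          · exact ⟨hm, by simpa using (congrArg Prod.snd he).symm⟩
          · exact absurd ((PySem.Set.mem_add s _ _).mpr (Or.inr rfl)) hna
        · rintro ⟨_, hw⟩
          exact Or.inl (by simp at hw; simp [hw])
      · have hbx : (pvLookup v field == x) = false := beq_eq_false_iff_ne.mpr hx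
        simp only [List.mem_cons, ih, List.find?, hbx]
        constructor
        · rintro (he | ⟨hna, hf⟩)
          · exact absurd (congrArg Prod.fst he) (by simpa using fun he' => hx he'.symm)
          · exact ⟨fun hmem => hna ((PySem.Set.mem_add s _ _).mpr (Or.inl hmem)), hf⟩
        · rintro ⟨hns', hf⟩
          exact Or.inr ⟨fun hmem =>
            ((PySem.Set.mem_add s _ _).mp hmem).elim hns' (fun he => hx he.symm), hf⟩

-- the keys of pvFirsts are distinct and avoid the seen-set
theorem pv_firsts_nodup (field : String) : ∀ (l : List (List (String × String)))
    (s : PySem.Set String),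
    ((pvFirsts field l s).map Prod.fst).Nodup ∧
      ∀ x ∈ (pvFirsts field l s).map Prod.fst, x ∉ s := by
  intro l
  induction l with
  | nil => intro s; simp [pvFirsts]
  | cons v t ih =>
    intro s
    simp only [pvFirsts]
    by_cases hm : pvLookup v field ∈ s
    · rw [if_pos ((PySem.Set.contains_iff s (pvLookup v field)).mpr hm)]
      exact ih s
    · rw [if_neg (fun hc => hm ((PySem.Set.contains_iff s (pvLookup v field)).mp hc))]
      obtain ⟨hnd, havoid⟩ := ih (PySem.Set.add s (pvLookup v field))
      refine ⟨?_, ?_⟩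
      · simp only [List.map_cons, List.nodup_cons]
        exact ⟨fun hmem => havoid _ hmem ((PySem.Set.mem_add s _ _).mpr (Or.inr rfl)), hnd⟩
      · intro x hx
        simp only [List.map_cons, List.mem_cons] at hx
        rcases hx with rfl | hx
        · exact hm
        · exact fun hmem => havoid x hx ((PySem.Set.mem_add s _ _).mpr (Or.inl hmem))

-- PySem.Set.ofList keeps a subsequence of the original list
theorem pv_ofList_sublist {α : Type} [BEq α] [LawfulBEq α] (xs : List α) :
    (PySem.Set.ofList xs).Sublist xs := by
  induction xs with
  | nil => simp [PySem.Set.ofList_nil]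
  | cons a t ih =>
    rw [PySem.Set.ofList_cons]
    exact List.Sublist.cons₂ a (List.Sublist.trans List.filter_sublist ih)

-- the core equality per branch: A's build equals B's dedupe-reverse/sort/rebuild
theorem pv_branch_eq (data : List (List (String × String))) (field : String) :
    pvBuildA data field
      = ((PySem.List.sorted (pvDedupRev data field).2 (fun kv => kv.1) false).foldl
          (fun d kv => d.insert kv.1 kv.2) PySem.Dict.empty).items := by
  set k : List (String × String) → String := fun v => pvLookup v field with hk
  set D2 : PySem.Dict String (List (String × String)) :=
    data.foldl (fun d v => d.insert (k v) v) PySem.Dict.empty with hD2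
  set pairs : List (String × List (String × String)) := (pvDedupRev data field).2 with hpairs
  -- pairs = pvFirsts over data.reverse from the empty set
  have hpairs_eq : pairs = pvFirsts field data.reverse PySem.Set.empty := by
    rw [hpairs]; unfold pvDedupRev
    rw [pv_fold_snd]; simp
  have hnd2 : D2.keys.Nodup := by
    rw [hD2]
    exact PySem.Dict.nodup_keys_foldl_insert_key _ k (fun _ v => v) _ (by simp)
  -- D2.get? x = first match in data.reverse
  have hget2 : ∀ x, D2.get? x = data.reverse.find? (fun v => k v == x) := by
    intro x
    rw [hD2, pv_get?_foldl]
    simp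
  -- membership in pairs ↔ membership in D2.items
  have hmem : ∀ p : String × List (String × String), p ∈ pairs ↔ p ∈ D2.items := by
    rintro ⟨x, w⟩
    rw [hpairs_eq, pv_mem_firsts,
      ← PySem.Dict.get?_eq_some_iff_mem_items D2 x w hnd2, hget2]
    simp [PySem.Set.empty, hk]
  -- nodup of both pair lists
  have hndp : ((pvFirsts field data.reverse PySem.Set.empty).map Prod.fst).Nodup :=
    (pv_firsts_nodup field data.reverse PySem.Set.empty).1
  have hndpairs : pairs.Nodup := by
    rw [hpairs_eq]; exact hndp.of_map
  have hnditems : D2.items.Nodup := by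
    have : (D2.items.map Prod.fst).Nodup := hnd2
    exact this.of_map
  have hperm : pairs.Perm D2.items :=
    (List.perm_ext_iff_of_nodup hndpairs hnditems).mpr (fun p => hmem p)
  -- sorted pairs = sorted D2.items
  have hndfst : (pairs.map Prod.fst).Nodup := by rw [hpairs_eq]; exact hndp
  have hsortedA : PySem.List.sorted D2.items (fun kv => kv.1) false
      = PySem.List.sorted pairs (fun kv => kv.1) false := by
    refine PySem.List.sorted_eq_of_perm_of_pairwise_lt D2.items
      (PySem.List.sorted pairs (fun kv => kv.1) false) (fun kv => kv.1) ?_ ?_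
    · exact (PySem.List.sorted_perm pairs (fun kv => kv.1) false).trans hperm
    · have hle := PySem.List.sorted_pairwise pairs (fun kv => kv.1)
      have hne : (PySem.List.sorted pairs (fun kv => kv.1) false).Pairwise
          (fun a b => a.1 ≠ b.1) := by
        have : ((PySem.List.sorted pairs (fun kv => kv.1) false).map Prod.fst).Nodup :=
          (((PySem.List.sorted_perm pairs (fun kv => kv.1) false).map Prod.fst).nodup_iff).mpr hndfst
        simpa [List.Nodup, List.pairwise_map] using this
      exact (hle.and hne).imp (fun ⟨h1, h2⟩ => lt_of_le_of_ne h1 h2)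
  -- A's side: D1.items is sorted D2.items (from the previous-style stability argument)
  set D1 : PySem.Dict String (List (String × String)) :=
    (PySem.List.sorted data k false).foldl (fun d v => d.insert (k v) v) PySem.Dict.empty with hD1
  have hget : ∀ x, D1.get? x = D2.get? x := by
    intro x
    rw [hD1, hD2, pv_get?_foldl, pv_get?_foldl, pv_find?_reverse, pv_find?_reverse,
      pv_filter_sorted]
  have hnd1 : D1.keys.Nodup := by
    rw [hD1]
    exact PySem.Dict.nodup_keys_foldl_insert_key _ k (fun _ v => v) _ (by simp)
  have hmemk : ∀ x, x ∈ D1.keys ↔ x ∈ D2.keys := by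
    intro x
    rw [← not_iff_not, ← PySem.Dict.get?_eq_none_iff_not_mem_keys,
      ← PySem.Dict.get?_eq_none_iff_not_mem_keys, hget]
  have hpermKeys : D1.keys.Perm D2.keys := (List.perm_ext_iff_of_nodup hnd1 hnd2).mpr hmemk
  have hgd : ∀ x, D1.getD x [] = D2.getD x [] := by
    intro x
    simp [PySem.Dict.getD, hget]
  have hit1 : D1.items = D1.keys.map (fun x => (x, D2.getD x [])) := by
    rw [PySem.Dict.items_eq_map_keys D1 hnd1 []]
    exact List.map_congr_left (fun x _ => by rw [hgd])
  have hit2 : D2.items = D2.keys.map (fun x => (x, D2.getD x [])) :=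
    PySem.Dict.items_eq_map_keys D2 hnd2 []
  have hpermItems : D1.items.Perm D2.items := by
    rw [hit1, hit2]; exact hpermKeys.map _
  have hkeys1 : D1.keys = PySem.Set.ofList ((PySem.List.sorted data k false).map k) := by
    rw [hD1, PySem.Dict.keys_foldl_insert_key _ k (fun _ v => v)]
    simp [PySem.Set.update_nil_left]
  have hple : D1.keys.Pairwise (fun a b => a ≤ b) := by
    rw [hkeys1]
    exact List.Pairwise.sublist (pv_ofList_sublist _)
      (PySem.List.sorted_map_key_pairwise data k)
  have hplt : D1.keys.Pairwise (fun a b => a < b) := by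
    have := hple.and (List.nodup_iff_pairwise_ne.mp hnd1)
    exact this.imp (fun ⟨h1, h2⟩ => lt_of_le_of_ne h1 h2)
  have hpw : D1.items.Pairwise (fun a b => a.1 < b.1) := by
    rw [hit1, List.pairwise_map]
    exact hplt
  have hA : PySem.List.sorted D2.items (fun kv => kv.1) false = D1.items :=
    PySem.List.sorted_eq_of_perm_of_pairwise_lt D2.items D1.items (fun kv => kv.1)
      hpermItems hpw
  -- B's rebuild: inserting the sorted fresh distinct pairs just lists them back
  have hndsortfst : ((PySem.List.sorted pairs (fun kv => kv.1) false).map Prod.fst).Nodup :=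
    (((PySem.List.sorted_perm pairs (fun kv => kv.1) false).map Prod.fst).nodup_iff).mpr hndfst
  have hB : ((PySem.List.sorted pairs (fun kv => kv.1) false).foldl
      (fun d kv => d.insert kv.1 kv.2) PySem.Dict.empty).items
      = PySem.List.sorted pairs (fun kv => kv.1) false := by
    rw [PySem.Dict.items_foldl_insert_fresh
      (PySem.List.sorted pairs (fun kv => kv.1) false)
      (fun kv => kv.1) (fun kv => kv.2) PySem.Dict.empty
      (by intro a _; simp) hndsortfst]
    simp [PySem.Dict.empty]
  unfold pvBuildA
  rw [← hk, ← hD1, hB, ← hsortedA, hA]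

-- ===== VERDICT (by name: the statement is the Claim_ definition above) =====
theorem filter_flights_spec : Claim_equal_filter_flights := by
  intro data_response filter_type _ hpre
  unfold Spec_filter_flights filter_flights filter_flights_alt
  rcases hpre.1 with h | h | h <;> subst h <;> simp [pv_branch_eq]
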